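-- pv_equiv track=rewrite | github.com/timshen24/RelearnAlgo | nomura_interview/frog_blocks.py | longest_distance
-- ===== SOURCE A (Python) =====
-- def longest_distance(blocks):
--     distance = -1
--     for i in range(len(blocks)):
--         index_1, index_2 = i, i
--         for j in range(i - 1, -1, -1):
--             if blocks[j] >= blocks[index_1]:
--                 index_1 = j
--             else:
--                 break
--         for k in range(i + 1, len(blocks)):
--             if blocks[k] >= blocks[index_2]:
--                 index_2 = k
--             else:
--                 break
--         if index_2 - index_1 + 1 > distance:
--             distance = index_2 - index_1 + 1
--     return distance
-- ===== SOURCE B (Python) =====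
-- def longest_distance(blocks):
--     n = len(blocks)
--     if n == 0:
--         return -1
--     L = [1] * n
--     for i in range(1, n):
--         if blocks[i - 1] >= blocks[i]:
--             L[i] = L[i - 1] + 1
--     R = [1] * n
--     for i in range(n - 2, -1, -1):
--         if blocks[i + 1] >= blocks[i]:
--             R[i] = R[i + 1] + 1
--     return max(L[i] + R[i] - 1 for i in range(n))
-- ===== Notes on version B (the rewrite author's own statement) =====
-- stated objective: faster
-- what changed: Replaces the per-index quadratic left/right scans with two linear DP passes computing run lengths L (non-increasing run ending at i) and R (non-decreasing run starting at i), then takes max(L[i]+R[i]-1).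
import Mathlib
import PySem

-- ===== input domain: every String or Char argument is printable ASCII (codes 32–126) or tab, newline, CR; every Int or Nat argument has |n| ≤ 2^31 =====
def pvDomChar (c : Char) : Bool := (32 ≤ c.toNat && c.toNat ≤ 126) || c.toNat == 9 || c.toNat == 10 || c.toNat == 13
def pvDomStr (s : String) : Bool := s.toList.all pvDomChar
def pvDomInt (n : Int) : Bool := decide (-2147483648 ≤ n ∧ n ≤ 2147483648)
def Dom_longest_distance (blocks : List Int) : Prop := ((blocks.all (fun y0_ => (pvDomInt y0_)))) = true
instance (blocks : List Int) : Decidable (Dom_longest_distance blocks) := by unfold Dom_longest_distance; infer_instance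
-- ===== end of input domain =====

-- B replaces A's quadratic per-index left/right scans by two linear run-length DP passes (objective: faster, asymptotic).

-- ===== PORT A =====
-- inner loop 'for j in range(i-1,-1,-1): …' — second Nat arg counts the remaining candidates (next j = arg - 1)
def pvLeftLoop (b : List Int) : Nat → Nat → Nat
  | idx, 0 => idx
  | idx, j + 1 => if b.getD j 0 ≥ b.getD idx 0 then pvLeftLoop b j j else idx

-- inner loop 'for k in range(i+1,len(blocks)): …' — last arg is the remaining fuel len - k
def pvRightLoop (b : List Int) : Nat → Nat → Nat → Nat
  | idx, _, 0 => idx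
  | idx, k, f + 1 => if b.getD k 0 ≥ b.getD idx 0 then pvRightLoop b k (k + 1) f else idx

def longest_distance (blocks : List Int) : Int :=
  (List.range blocks.length).foldl
    (fun distance i =>
      let index_1 := pvLeftLoop blocks i i
      let index_2 := pvRightLoop blocks i (i + 1) (blocks.length - (i + 1))
      if (index_2 : Int) - (index_1 : Int) + 1 > distance then (index_2 : Int) - (index_1 : Int) + 1
      else distance)
    (-1)

-- ===== PORT B =====
-- forward pass: successive L values (prev element, previous L value, rest of list)
def pvLvals : Int → Int → List Int → List Int
  | _, _, [] => []
  | prev, acc, x :: xs =>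
    let c := if prev ≥ x then acc + 1 else 1
    c :: pvLvals x c xs

-- backward pass computed right-to-left by structural recursion
def pvRvals : List Int → List Int
  | [] => []
  | [_] => [1]
  | x :: y :: xs =>
    let r := pvRvals (y :: xs)
    (if y ≥ x then r.headD 0 + 1 else 1) :: r

def longest_distance_alt (blocks : List Int) : Int :=
  match blocks with
  | [] => -1
  | x :: xs =>
    let L := (1 : Int) :: pvLvals x 1 xs
    let R := pvRvals (x :: xs)
    let vals := List.zipWith (fun l r => l + r - 1) L R
    (PySem.List.max? vals (fun v => v)).getD 0

-- ===== PRECONDITION & SPEC =====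
def Spec_longest_distance (blocks : List Int) (out : Int) : Prop := out = longest_distance_alt blocks
instance (blocks : List Int) (out : Int) : Decidable (Spec_longest_distance blocks out) := by unfold Spec_longest_distance; infer_instance

-- ===== CLAIM (what is proved, stated in full; the proofs are below) =====
def Claim_equal_longest_distance : Prop := ∀ (blocks : List Int), Dom_longest_distance blocks → Spec_longest_distance blocks (longest_distance blocks)

-- ===== LEMMAS AND PROOFS =====

-- spec functions used only by the proofs
def pvLspec (b : List Int) : Nat → Int
  | 0 => 1
  | i + 1 => if b.getD i 0 ≥ b.getD (i + 1) 0 then pvLspec b i + 1 else 1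

def pvRspec (b : List Int) (n : Nat) (i : Nat) : Int :=
  if _h : i + 1 < n then
    (if b.getD (i + 1) 0 ≥ b.getD i 0 then pvRspec b n (i + 1) + 1 else 1)
  else 1
termination_by n - i

lemma lspec_eq (b : List Int) : ∀ i : Nat,
    pvLeftLoop b i i ≤ i ∧ pvLspec b i = (i : Int) - (pvLeftLoop b i i : Int) + 1 := by
  intro i
  induction i with
  | zero => simp [pvLeftLoop, pvLspec]
  | succ i ih =>
    have h1 : pvLeftLoop b (i + 1) (i + 1)
        = if b.getD i 0 ≥ b.getD (i + 1) 0 then pvLeftLoop b i i else i + 1 := rfl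
    have h2 : pvLspec b (i + 1)
        = if b.getD i 0 ≥ b.getD (i + 1) 0 then pvLspec b i + 1 else 1 := rfl
    rw [h1, h2]
    split_ifs with h
    · obtain ⟨hle, heq⟩ := ih
      constructor
      · omega
      · push_cast; omega
    · constructor
      · omega
      · push_cast; omega

lemma rstep (b : List Int) (n i : Nat) (h : i + 1 < n) :
    pvRightLoop b i (i + 1) (n - (i + 1))
      = if b.getD (i + 1) 0 ≥ b.getD i 0 then pvRightLoop b (i + 1) (i + 2) (n - (i + 2)) else i := by
  have h1 : n - (i + 1) = (n - (i + 2)) + 1 := by omega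
  rw [h1]
  rfl

lemma rspec_eq (b : List Int) (n : Nat) : ∀ d i : Nat, n - i ≤ d → i < n →
    i ≤ pvRightLoop b i (i + 1) (n - (i + 1)) ∧
    pvRightLoop b i (i + 1) (n - (i + 1)) < n ∧
    pvRspec b n i = (pvRightLoop b i (i + 1) (n - (i + 1)) : Int) - (i : Int) + 1 := by
  intro d
  induction d with
  | zero => intro i h hi; omega
  | succ d ih =>
    intro i h hi
    by_cases hlt : i + 1 < n
    · rw [rstep b n i hlt]
      have hr : pvRspec b n i
          = if b.getD (i + 1) 0 ≥ b.getD i 0 then pvRspec b n (i + 1) + 1 else 1 := by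
        rw [pvRspec, dif_pos hlt]
      rw [hr]
      obtain ⟨h1, h2, h3⟩ := ih (i + 1) (by omega) hlt
      have e2 : i + 1 + 1 = i + 2 := rfl
      rw [e2] at h1 h2 h3
      split_ifs with hc
      · refine ⟨by omega, by omega, ?_⟩
        rw [h3]; omega
      · exact ⟨le_refl i, hi, by omega⟩
    · have hz : n - (i + 1) = 0 := by omega
      rw [hz]
      have hr : pvRspec b n i = 1 := by rw [pvRspec, dif_neg hlt]
      have h0 : pvRightLoop b i (i + 1) 0 = i := rfl
      rw [h0, hr]
      exact ⟨le_refl i, hi, by omega⟩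

lemma lvals_eq (b : List Int) : ∀ m i : Nat, b.length - (i + 1) = m → i < b.length →
    pvLvals (b.getD i 0) (pvLspec b i) (b.drop (i + 1))
      = (List.range m).map (fun j => pvLspec b (i + 1 + j)) := by
  intro m
  induction m with
  | zero =>
    intro i h _
    have : b.drop (i + 1) = [] := List.drop_eq_nil_of_le (by omega)
    simp [this, pvLvals]
  | succ m ih =>
    intro i h hi
    have hlt : i + 1 < b.length := by omega
    rw [List.drop_eq_getElem_cons hlt]
    have hget : b.getD (i + 1) 0 = b[i + 1] := List.getD_eq_getElem b 0 hlt
    have hc : (if b.getD i 0 ≥ b[i + 1] then pvLspec b i + 1 else 1) = pvLspec b (i + 1) := by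
      rw [show pvLspec b (i + 1) = if b.getD i 0 ≥ b.getD (i + 1) 0 then pvLspec b i + 1 else 1 from rfl,
        hget]
    rw [show pvLvals (b.getD i 0) (pvLspec b i) (b[i + 1] :: b.drop (i + 1 + 1))
        = (if b.getD i 0 ≥ b[i + 1] then pvLspec b i + 1 else 1)
          :: pvLvals b[i + 1] (if b.getD i 0 ≥ b[i + 1] then pvLspec b i + 1 else 1)
              (b.drop (i + 1 + 1)) from rfl]
    rw [hc, ← hget]
    rw [ih (i + 1) (by omega) hlt]
    rw [List.range_succ_eq_map]
    simp only [List.map_cons, List.map_map]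
    congr 1
    apply List.map_congr_left
    intro j _
    simp only [Function.comp_apply]
    exact congrArg (pvLspec b) (by omega)

lemma rvals_eq (b : List Int) : ∀ m i : Nat, b.length - i = m →
    pvRvals (b.drop i) = (List.range m).map (fun j => pvRspec b b.length (i + j)) := by
  intro m
  induction m using Nat.strong_induction_on with
  | _ m ih =>
    intro i h
    match m, h with
    | 0, h =>
      have : b.drop i = [] := List.drop_eq_nil_of_le (by omega)
      simp [this, pvRvals]
    | 1, h =>
      have hi : i < b.length := by omega
      rw [List.drop_eq_getElem_cons hi]
      have : b.drop (i + 1) = [] := List.drop_eq_nil_of_le (by omega)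
      rw [this]
      have hr : pvRspec b b.length i = 1 := by rw [pvRspec, dif_neg (by omega)]
      simp [pvRvals, hr]
    | (m + 2), h =>
      have hi : i < b.length := by omega
      have hi1 : i + 1 < b.length := by omega
      have hd : b.drop i = b[i] :: b[i + 1] :: b.drop (i + 2) := by
        rw [List.drop_eq_getElem_cons hi, List.drop_eq_getElem_cons hi1]
      have hd1 : b.drop (i + 1) = b[i + 1] :: b.drop (i + 2) := List.drop_eq_getElem_cons hi1
      have htail : pvRvals (b.drop (i + 1))
          = (List.range (m + 1)).map (fun j => pvRspec b b.length (i + 1 + j)) :=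
        ih (m + 1) (by omega) (i + 1) (by omega)
      have hv : pvRvals (b.drop i)
          = (if b[i + 1] ≥ b[i] then (pvRvals (b.drop (i + 1))).headD 0 + 1 else 1)
            :: pvRvals (b.drop (i + 1)) := by
        rw [hd, hd1]
        rfl
      rw [hv, htail]
      have hhead : ((List.range (m + 1)).map (fun j => pvRspec b b.length (i + 1 + j))).headD 0
          = pvRspec b b.length (i + 1) := by
        rw [List.range_succ_eq_map]
        simp
      have hgi : b.getD i 0 = b[i] := List.getD_eq_getElem b 0 hi
      have hgi1 : b.getD (i + 1) 0 = b[i + 1] := List.getD_eq_getElem b 0 hi1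
      have hri : pvRspec b b.length i
          = if b[i + 1] ≥ b[i] then pvRspec b b.length (i + 1) + 1 else 1 := by
        rw [pvRspec, dif_pos hi1, hgi, hgi1]
      rw [hhead]
      conv_rhs => rw [List.range_succ_eq_map]
      simp only [List.map_cons, List.map_map]
      congr 1
      · exact hri.symm
      · apply List.map_congr_left
        intro j _
        simp only [Function.comp_apply]
        exact congrArg (pvRspec b b.length) (by omega)

lemma zipWith_map_same {α β γ δ : Type} (f : β → γ → δ) (g : α → β) (h : α → γ) :
    ∀ l : List α, List.zipWith f (l.map g) (l.map h) = l.map (fun a => f (g a) (h a)) := by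
  intro l
  induction l with
  | nil => rfl
  | cons a l ih => simp [ih]

lemma A_as_max (b : List Int) :
    longest_distance b
      = List.foldl max (-1)
          ((List.range b.length).map
            (fun i => (pvRightLoop b i (i + 1) (b.length - (i + 1)) : Int)
                        - (pvLeftLoop b i i : Int) + 1)) := by
  unfold longest_distance
  rw [List.foldl_map]
  congr 1
  funext d i
  dsimp only
  split_ifs with h
  · omega
  · omega

-- ===== VERDICT (by name: the statement is the Claim_ definition above) =====
theorem longest_distance_spec : Claim_equal_longest_distance := by
  intro blocks _
  unfold Spec_longest_distance
  cases hb : blocks with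
  | nil => rfl
  | cons x xs =>
    set b := x :: xs with hbdef
    have hn : 0 < b.length := by simp [hbdef]
    -- B side: the two DP lists are the spec maps
    have hL : (1 : Int) :: pvLvals x 1 xs = (List.range b.length).map (fun j => pvLspec b j) := by
      have h0 : b.getD 0 0 = x := rfl
      have h1 : pvLspec b 0 = 1 := rfl
      have h2 : b.drop 1 = xs := rfl
      have hlv := lvals_eq b (b.length - 1) 0 rfl hn
      rw [h0, h1, h2] at hlv
      have hrng : List.range b.length = 0 :: (List.range (b.length - 1)).map Nat.succ := by
        rw [show b.length = (b.length - 1) + 1 from by omega]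
        exact List.range_succ_eq_map
      rw [hrng]
      simp only [List.map_cons, List.map_map]
      congr 1
      rw [hlv]
      apply List.map_congr_left
      intro j _
      simp only [Function.comp_apply]
      exact congrArg (pvLspec b) (by omega)
    have hR : pvRvals b = (List.range b.length).map (fun j => pvRspec b b.length j) := by
      have := rvals_eq b b.length 0 rfl
      simpa using this
    -- combine into the per-index values
    have hzip : List.zipWith (fun l r => l + r - 1) ((1 : Int) :: pvLvals x 1 xs) (pvRvals b)
        = (List.range b.length).map (fun i => pvLspec b i + pvRspec b b.length i - 1) := by
      rw [hL, hR, zipWith_map_same]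
    have hvals : (List.range b.length).map (fun i => pvLspec b i + pvRspec b b.length i - 1)
        = (List.range b.length).map
            (fun i => (pvRightLoop b i (i + 1) (b.length - (i + 1)) : Int)
                        - (pvLeftLoop b i i : Int) + 1) := by
      apply List.map_congr_left
      intro i hi
      have hi' : i < b.length := List.mem_range.mp hi
      obtain ⟨hl1, hl2⟩ := lspec_eq b i
      obtain ⟨hr1, hr2, hr3⟩ := rspec_eq b b.length b.length i (by omega) hi'
      rw [hl2, hr3]
      omega
    have halt : longest_distance_alt b
        = (PySem.List.max? ((List.range b.length).map
            (fun i => (pvRightLoop b i (i + 1) (b.length - (i + 1)) : Int)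
                        - (pvLeftLoop b i i : Int) + 1)) (fun v => v)).getD 0 := by
      show (PySem.List.max? (List.zipWith (fun l r => l + r - 1)
              ((1 : Int) :: pvLvals x 1 xs) (pvRvals b)) (fun v => v)).getD 0 = _
      rw [hzip, hvals]
    -- both sides as a running max over the same nonempty list
    have hrng : List.range b.length = 0 :: (List.range (b.length - 1)).map Nat.succ := by
      rw [show b.length = (b.length - 1) + 1 from by omega]
      exact List.range_succ_eq_map
    rw [A_as_max, halt, hrng]
    simp only [List.map_cons]
    rw [PySem.List.max?_id_cons]
    simp only [Option.getD_some, List.foldl_cons]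
    have hla0 : pvLeftLoop b 0 0 = 0 := rfl
    rw [hla0]
    have h0le : (0 : Int) ≤ (pvRightLoop b 0 (0 + 1) (b.length - (0 + 1)) : Int) :=
      Int.natCast_nonneg _
    have hmax : max (-1 : Int) ((pvRightLoop b 0 (0 + 1) (b.length - (0 + 1)) : Int)
        - ((0 : Nat) : Int) + 1)
        = (pvRightLoop b 0 (0 + 1) (b.length - (0 + 1)) : Int) - ((0 : Nat) : Int) + 1 := by
      omega
    rw [hmax]
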